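-- pv_equiv track=rewrite | github.com/ahmedelbrmbaly/FlattenMatrix | flattenMatrix.py | An3dArr
-- ===== SOURCE A (Python) =====
-- def An3dArr(n, m, p):
--     """
--     The function to add Items to 3d Array os ize n*m*p.
--
--     Parameters:
--         n (int): diminsion
--         m (int): diminsion
--         p (int): diminsion
--
--     Returns:
--         3d array with items from 0 to n*m*p
--     """
--     arr = []
--     num = 0
--     # add items to 3d array
--     for i in range(n):
--         arr.append([])
--
--         for j in range(m):
--             arr[i].append([])
--
--             for k in range(p):
--                 arr[i][j].append(num)
--                 num += 1
--     return arr
-- ===== SOURCE B (Python) =====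
-- def An3dArr(n, m, p):
--     return [[list(range((i * m + j) * p, (i * m + j + 1) * p))
--              for j in range(m)]
--             for i in range(n)]
-- ===== Notes on version B (the rewrite author's own statement) =====
-- stated objective: alternative
-- what changed: Instead of a triple-nested loop filling cells with a running counter, B computes each innermost row directly as list(range((i*m+j)*p, (i*m+j+1)*p)) from the arithmetic row index, nested in comprehensions over range(n) and range(m).
import Mathlib
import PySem

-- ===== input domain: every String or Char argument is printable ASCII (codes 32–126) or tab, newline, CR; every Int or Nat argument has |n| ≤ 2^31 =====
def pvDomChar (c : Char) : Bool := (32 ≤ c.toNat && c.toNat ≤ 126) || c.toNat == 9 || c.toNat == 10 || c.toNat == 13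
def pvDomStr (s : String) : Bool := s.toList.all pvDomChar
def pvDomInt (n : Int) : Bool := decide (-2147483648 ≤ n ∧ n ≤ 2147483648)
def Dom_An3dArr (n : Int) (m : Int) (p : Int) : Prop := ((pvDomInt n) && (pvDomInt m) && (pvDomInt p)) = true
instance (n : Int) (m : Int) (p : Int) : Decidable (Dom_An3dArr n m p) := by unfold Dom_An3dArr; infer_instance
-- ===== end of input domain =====

-- B computes each innermost row directly as range(start, start+p) from the arithmetic index, instead of filling a 3D array with a running counter (alternative decomposition, same cost).


-- ===== PORT A =====
-- triple-nested for-loops: a plane per i, a row per j, a cell per k, threading the counter num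
def An3dArr (n : Int) (m : Int) (p : Int) : List (List (List Int)) :=
  let res := (PySem.List.pyRange 0 n 1).foldl
    (fun (acc : List (List (List Int)) × Int) _i =>
      let inner := (PySem.List.pyRange 0 m 1).foldl
        (fun (acc2 : List (List Int) × Int) _j =>
          let inner2 := (PySem.List.pyRange 0 p 1).foldl
            (fun (acc3 : List Int × Int) _k =>
              (acc3.1 ++ [acc3.2], acc3.2 + 1))
            (([] : List Int), acc2.2)
          (acc2.1 ++ [inner2.1], inner2.2))
        (([] : List (List Int)), acc.2)
      (acc.1 ++ [inner.1], inner.2))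
    (([] : List (List (List Int))), (0 : Int))
  res.1

-- ===== PORT B =====
-- each row (i,j) is list(range((i*m+j)*p, (i*m+j+1)*p)), nested in comprehensions over range(n), range(m)
def An3dArr_alt (n : Int) (m : Int) (p : Int) : List (List (List Int)) :=
  (PySem.List.pyRange 0 n 1).map (fun i =>
    (PySem.List.pyRange 0 m 1).map (fun j =>
      PySem.List.pyRange ((i * m + j) * p) ((i * m + j + 1) * p) 1))

-- ===== PRECONDITION & SPEC =====
def Spec_An3dArr (n : Int) (m : Int) (p : Int) (out : List (List (List Int))) : Prop := out = An3dArr_alt n m p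
instance (n : Int) (m : Int) (p : Int) (out : List (List (List Int))) : Decidable (Spec_An3dArr n m p out) := by unfold Spec_An3dArr; infer_instance

-- ===== CLAIM (what is proved, stated in full; the proofs are below) =====
def Claim_equal_An3dArr : Prop := ∀ (n : Int) (m : Int) (p : Int), Dom_An3dArr n m p → Spec_An3dArr n m p (An3dArr n m p)

-- ===== LEMMAS AND PROOFS =====

-- innermost loop: appends num, num+1, … to the row and advances the counter by P
theorem rowFold (P : Nat) (num : Int) (r : List Int) :
    (List.range P).foldl (fun (a : List Int × Int) (_ : Nat) => (a.1 ++ [a.2], a.2 + 1)) (r, num)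
    = (r ++ (List.range P).map (fun k : Nat => num + (k : Int)), num + (P : Int)) := by
  induction P generalizing num r with
  | zero => simp
  | succ P ih =>
    rw [List.range_succ, List.foldl_append, ih]
    simp
    ring

-- middle loop: appends M rows and advances the counter by M*P
theorem planeFold (M P : Nat) (num : Int) (pl : List (List Int)) :
    (List.range M).foldl (fun (a2 : List (List Int) × Int) (_ : Nat) =>
        let inner2 := (List.range P).foldl (fun (a3 : List Int × Int) (_ : Nat) => (a3.1 ++ [a3.2], a3.2 + 1)) (([] : List Int), a2.2)
        (a2.1 ++ [inner2.1], inner2.2)) (pl, num)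
    = (pl ++ (List.range M).map (fun j => (List.range P).map (fun k : Nat => num + ((j * P + k : Nat) : Int))), num + ((M * P : Nat) : Int)) := by
  induction M generalizing num pl with
  | zero => simp
  | succ M ih =>
    rw [List.range_succ, List.foldl_append, ih]
    simp only [List.foldl_cons, List.foldl_nil, rowFold, Prod.mk.injEq]
    refine ⟨?_, by push_cast; ring⟩
    simp only [List.map_append, List.map_cons, List.map_nil, List.append_assoc, List.nil_append]
    congr 3
    apply List.map_congr_left
    intro k _
    push_cast; ring

-- outer loop: appends N planes and advances the counter by N*M*P
theorem outerFold (N M P : Nat) (num : Int) (acc : List (List (List Int))) :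
    (List.range N).foldl (fun (a : List (List (List Int)) × Int) (_ : Nat) =>
        let inner := (List.range M).foldl (fun (a2 : List (List Int) × Int) (_ : Nat) =>
            let inner2 := (List.range P).foldl (fun (a3 : List Int × Int) (_ : Nat) => (a3.1 ++ [a3.2], a3.2 + 1)) (([] : List Int), a2.2)
            (a2.1 ++ [inner2.1], inner2.2)) (([] : List (List Int)), a.2)
        (a.1 ++ [inner.1], inner.2)) (acc, num)
    = (acc ++ (List.range N).map (fun i => (List.range M).map (fun j => (List.range P).map (fun k : Nat => num + (((i * M + j) * P + k : Nat) : Int)))), num + ((N * M * P : Nat) : Int)) := by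
  induction N generalizing num acc with
  | zero => simp
  | succ N ih =>
    rw [List.range_succ, List.foldl_append, ih]
    simp only [List.foldl_cons, List.foldl_nil, planeFold, Prod.mk.injEq]
    refine ⟨?_, by push_cast; ring⟩
    simp only [List.map_append, List.map_cons, List.map_nil, List.append_assoc, List.nil_append]
    congr 3
    apply List.map_congr_left
    intro j _
    apply List.map_congr_left
    intro k _
    push_cast; ring

-- the common shape both ports compute: cell (i,j,k) holds (i*M+j)*P+k
def pvBuild (N M P : Nat) : List (List (List Int)) :=
  (List.range N).map (fun i =>
    (List.range M).map (fun j =>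
      (List.range P).map (fun k : Nat => (((i * M + j) * P + k : Nat) : Int))))

theorem An3dArr_eq_build (n m p : Int) :
    An3dArr n m p = pvBuild n.toNat m.toNat p.toNat := by
  unfold An3dArr
  simp only [PySem.List.pyRange_one, Int.sub_zero, List.foldl_map]
  rw [outerFold]
  simp [pvBuild]

theorem An3dArr_alt_eq_build (n m p : Int) :
    An3dArr_alt n m p = pvBuild n.toNat m.toNat p.toNat := by
  unfold An3dArr_alt
  simp only [PySem.List.pyRange_one, Int.sub_zero, List.map_map, pvBuild]
  apply List.map_congr_left
  intro i hi
  apply List.map_congr_left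
  intro j hj
  have hi' : i < n.toNat := List.mem_range.mp hi
  have hj' : j < m.toNat := List.mem_range.mp hj
  have hn : 0 < n := by omega
  have hm : 0 < m := by omega
  simp only [Function.comp, zero_add]
  have hd : ((i : Int) * m + (j : Int) + 1) * p - ((i : Int) * m + (j : Int)) * p = p := by ring
  rw [hd]
  by_cases hp : p ≤ 0
  · have hP : p.toNat = 0 := by omega
    rw [hP]
    simp
  · have hp' : 0 < p := by omega
    apply List.map_congr_left
    intro k hk
    have hm' : m = ((m.toNat : Nat) : Int) := by omega
    have hp'' : p = ((p.toNat : Nat) : Int) := by omega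
    rw [hm', hp'']
    simp only [Int.toNat_natCast]
    push_cast
    ring

-- ===== VERDICT (by name: the statement is the Claim_ definition above) =====
theorem An3dArr_spec : Claim_equal_An3dArr := by
  intro n m p _
  unfold Spec_An3dArr
  rw [An3dArr_eq_build, An3dArr_alt_eq_build]
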